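-- pv_equiv track=rewrite | github.com/981377660LMT/algorithm-study | 21_位运算/二进制枚举与三进制枚举/枚举所有子集的子集/模板.py | genPowerSetFromAllPowerSet2
-- ===== SOURCE A (Python) =====
-- from typing import Collection, List, Tuple
--
-- def genPowerSetFromAllPowerSet2(nums: List[int]) -> List[List[Tuple[int, ...]]]:
--     """举所有子集的`非空`子集，返回pair互补对，时间复杂度O(3^n)"""
--     n = len(nums)
--     res = []
--     for state in range(1 << n):
--         cur = []
--         group1, group2 = state, 0
--         while group1:
--             cur.append((group1, group2))  # 其实append group1就可以了
--             # 关键，不断减一+与运算跳数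
--             group1 = state & (group1 - 1)
--             group2 = state ^ group1
--         res.append(cur)
--     return res
-- ===== SOURCE B (Python) =====
-- from typing import List, Tuple
--
-- def genPowerSetFromAllPowerSet2(nums: List[int]) -> List[List[Tuple[int, ...]]]:
--     """For each state, scan t downward from state to 1 and keep the submasks of state."""
--     n = len(nums)
--     res = []
--     for state in range(1 << n):
--         res.append([(t, state ^ t) for t in range(state, 0, -1) if t & state == t])
--     return res
-- ===== Notes on version B (the rewrite author's own statement) =====
-- stated objective: simpler
-- what changed: Replaces the stateful `group1 = state & (group1 - 1)` submask-descent loop with complement bookkeeping by a direct downward scan over t = state..1 filtered by t & state == t, computing each pair (t, state ^ t) independently.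
import Mathlib
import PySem

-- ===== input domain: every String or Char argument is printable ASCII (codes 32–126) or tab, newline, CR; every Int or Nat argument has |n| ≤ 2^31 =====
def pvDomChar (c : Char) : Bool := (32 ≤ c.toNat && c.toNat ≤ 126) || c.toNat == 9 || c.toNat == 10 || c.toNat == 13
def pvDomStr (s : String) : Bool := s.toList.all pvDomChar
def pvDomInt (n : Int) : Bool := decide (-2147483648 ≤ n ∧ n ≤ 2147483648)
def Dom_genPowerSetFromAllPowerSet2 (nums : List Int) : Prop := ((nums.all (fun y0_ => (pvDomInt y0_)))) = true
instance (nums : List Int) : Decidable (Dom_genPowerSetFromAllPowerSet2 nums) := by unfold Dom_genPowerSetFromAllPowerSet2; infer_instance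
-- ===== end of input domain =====

-- B replaces A's stateful `group1 = state & (group1 - 1)` submask-descent loop by a direct
-- downward scan over t = state..1 filtered by `t & state == t` (objective: simpler).


-- ===== PORT A =====
-- A's `while group1:` loop. All integers involved (`state`, `group1`, `group2`) are
-- nonnegative Python ints from range(1 << n), tracked as Nat (exact on this domain);
-- the appended pairs are cast to Int. `group2 = state ^ group1` is recomputed exactly
-- as in the Python body.
def pvDescA (state : Nat) (group1 : Nat) (group2 : Nat) : List (Int × Int) :=
  if h : group1 = 0 then []
  else ((group1 : Int), (group2 : Int)) ::
    pvDescA state (state &&& (group1 - 1)) (state ^^^ (state &&& (group1 - 1)))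
termination_by group1
decreasing_by
  have h1 : state &&& (group1 - 1) ≤ group1 - 1 := Nat.and_le_right
  omega

-- `for state in range(1 << n): … res.append(cur)`
def genPowerSetFromAllPowerSet2 (nums : List Int) : List (List (Int × Int)) :=
  (List.range (1 <<< nums.length)).map (fun state => pvDescA state state 0)

-- ===== PORT B =====
-- `range(state, 0, -1)` is [state, state-1, …, 1] = (List.range' 1 state).reverse.
def genPowerSetFromAllPowerSet2_alt (nums : List Int) : List (List (Int × Int)) :=
  (List.range (1 <<< nums.length)).map (fun state =>
    ((List.range' 1 state).reverse.filter (fun t => t &&& state == t)).map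
      (fun t : Nat => ((t : Int), (((state ^^^ t) : Nat) : Int))))

-- ===== PRECONDITION & SPEC =====
def Spec_genPowerSetFromAllPowerSet2 (nums : List Int) (out : List (List (Int × Int))) : Prop := out = genPowerSetFromAllPowerSet2_alt nums
instance (nums : List Int) (out : List (List (Int × Int))) : Decidable (Spec_genPowerSetFromAllPowerSet2 nums out) := by unfold Spec_genPowerSetFromAllPowerSet2; infer_instance

-- ===== CLAIM (what is proved, stated in full; the proofs are below) =====
def Claim_equal_genPowerSetFromAllPowerSet2 : Prop := ∀ (nums : List Int), Dom_genPowerSetFromAllPowerSet2 nums → Spec_genPowerSetFromAllPowerSet2 nums (genPowerSetFromAllPowerSet2 nums)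

-- ===== LEMMAS AND PROOFS =====

-- Key fact behind the decrement trick: any submask t of `state` below a submask g
-- is at most state &&& (g-1); so state &&& (g-1) is the next submask below g.
theorem pvKey : ∀ g state t : Nat, g &&& state = g → t &&& state = t → t < g →
    t ≤ state &&& (g - 1) := by
  intro g
  induction g using Nat.strong_induction_on with
  | _ g IH =>
    intro state t hg ht htg
    rcases Nat.eq_zero_or_pos g with hg0 | hgpos
    · omega
    rcases Nat.mod_two_eq_zero_or_one g with ge | go
    · -- g even
      have hgd : g / 2 &&& state / 2 = g / 2 := by
        have := congrArg (· / 2) hg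
        simpa [Nat.and_div_two] using this
      have htd : t / 2 &&& state / 2 = t / 2 := by
        have := congrArg (· / 2) ht
        simpa [Nat.and_div_two] using this
      have hIH := IH (g / 2) (by omega) (state / 2) (t / 2) hgd htd (by omega)
      have hx2 : (state &&& (g - 1)) / 2 = state / 2 &&& (g / 2 - 1) := by
        rw [Nat.and_div_two]
        congr 1
        omega
      have hxm : (state &&& (g - 1)) % 2 = state % 2 := by
        rcases Nat.mod_two_eq_zero_or_one state with se | so
        · rcases Nat.mod_two_eq_zero_or_one (state &&& (g - 1)) with e | o
          · omega
          · have := (Nat.and_mod_two_eq_one.mp o).1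
            omega
        · have : (state &&& (g - 1)) % 2 = 1 :=
            Nat.and_mod_two_eq_one.mpr ⟨so, by omega⟩
          omega
      have htm : t % 2 = 0 ∨ (t % 2 = 1 ∧ state % 2 = 1) := by
        rcases Nat.mod_two_eq_zero_or_one t with e | o
        · exact Or.inl e
        · refine Or.inr ⟨o, ?_⟩
          have h1 : (t &&& state) % 2 = 1 := by rw [ht]; exact o
          exact (Nat.and_mod_two_eq_one.mp h1).2
      omega
    · -- g odd: state &&& (g-1) = g-1
      have hgd : g / 2 &&& state / 2 = g / 2 := by
        have := congrArg (· / 2) hg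
        simpa [Nat.and_div_two] using this
      have hx2 : (state &&& (g - 1)) / 2 = g / 2 := by
        rw [Nat.and_div_two]
        have h1 : (g - 1) / 2 = g / 2 := by omega
        rw [h1, Nat.land_comm, hgd]
      have hxm : (state &&& (g - 1)) % 2 = 0 := by
        rcases Nat.mod_two_eq_zero_or_one (state &&& (g - 1)) with e | o
        · exact e
        · have := (Nat.and_mod_two_eq_one.mp o).2
          omega
      omega

-- A's inner while-loop, started at a submask g of state, yields exactly the
-- submask scan of B over [g, g-1, …, 1].
theorem pvDescA_eq (state : Nat) : ∀ g : Nat, g &&& state = g →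
    pvDescA state g (state ^^^ g) =
      ((List.range' 1 g).reverse.filter (fun t => t &&& state == t)).map
        (fun t : Nat => ((t : Int), (((state ^^^ t) : Nat) : Int))) := by
  intro g
  induction g using Nat.strong_induction_on with
  | _ g IH =>
    intro hg
    rcases Nat.eq_zero_or_pos g with hg0 | hgpos
    · subst hg0; rw [pvDescA]; simp
    · have hp : (state &&& (g - 1)) &&& state = state &&& (g - 1) := by
        rw [Nat.land_comm (state &&& (g - 1)) state, ← Nat.land_assoc, Nat.and_self]
      have hple : state &&& (g - 1) ≤ g - 1 := Nat.and_le_right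
      have hIH := IH (state &&& (g - 1)) (by omega) hp
      have hsplit : List.range' 1 g =
          (List.range' 1 (state &&& (g - 1)) ++
            List.range' ((state &&& (g - 1)) + 1) (g - 1 - (state &&& (g - 1)))) ++ [g] := by
        have hA : List.range' 1 (state &&& (g - 1)) 1 ++
            List.range' (1 + 1 * (state &&& (g - 1))) (g - 1 - (state &&& (g - 1))) 1 =
            List.range' 1 ((state &&& (g - 1)) + (g - 1 - (state &&& (g - 1)))) 1 :=
          List.range'_append
        rw [show (state &&& (g - 1)) + (g - 1 - (state &&& (g - 1))) = g - 1 by omega,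
            show 1 + 1 * (state &&& (g - 1)) = (state &&& (g - 1)) + 1 by omega] at hA
        rw [hA]
        have h2 := List.range'_concat (s := 1) (n := g - 1) (step := 1)
        simpa [show g - 1 + 1 = g by omega, show 1 + 1 * (g - 1) = g by omega,
            show 1 + (g - 1) = g by omega] using h2
      have hnil : (List.range' ((state &&& (g - 1)) + 1) (g - 1 - (state &&& (g - 1)))).filter
          (fun t => t &&& state == t) = [] := by
        rw [List.filter_eq_nil_iff]
        intro t htmem
        rw [List.mem_range'_1] at htmem
        simp only [beq_iff_eq]
        intro hts
        have := pvKey g state t hg hts (by omega)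
        omega
      rw [pvDescA, dif_neg (by omega : ¬ g = 0), hsplit, hIH]
      simp [hnil, hg, List.filter_reverse]

-- ===== VERDICT (by name: the statement is the Claim_ definition above) =====
theorem genPowerSetFromAllPowerSet2_spec : Claim_equal_genPowerSetFromAllPowerSet2 := by
  intro nums _
  unfold Spec_genPowerSetFromAllPowerSet2 genPowerSetFromAllPowerSet2 genPowerSetFromAllPowerSet2_alt
  apply List.map_congr_left
  intro state _
  rw [show (0 : Nat) = state ^^^ state from (Nat.xor_self state).symm]
  exact pvDescA_eq state state (Nat.and_self state)
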